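-- pv_equiv track=rewrite | github.com/C0BBL3/kaggle | titanic/kaggle_titanic_csv.py | boolize_data
-- ===== SOURCE A (Python) =====
-- def boolize_data(array):
--     unique_data = sorted(set(array))
--     mid_point = len(unique_data) // 2
--     high = unique_data[mid_point:]
--     low = unique_data[:mid_point]
--     fixed_array = []
--     for element in array:
--         if element in low:
--             fixed_array.append(False)
--         elif element in high:
--             fixed_array.append(True)
--     return fixed_array
-- ===== SOURCE B (Python) =====
-- def boolize_data(array):
--     if not array:
--         return []
--     unique_data = sorted(set(array))
--     threshold = unique_data[len(unique_data) // 2]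
--     return [x >= threshold for x in array]
-- ===== Notes on version B (the rewrite author's own statement) =====
-- stated objective: faster
-- what changed: Replaces the per-element linear membership scans over the low/high halves with a single threshold value (the first element of the high half) compared against each element in one map pass.
import Mathlib
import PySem

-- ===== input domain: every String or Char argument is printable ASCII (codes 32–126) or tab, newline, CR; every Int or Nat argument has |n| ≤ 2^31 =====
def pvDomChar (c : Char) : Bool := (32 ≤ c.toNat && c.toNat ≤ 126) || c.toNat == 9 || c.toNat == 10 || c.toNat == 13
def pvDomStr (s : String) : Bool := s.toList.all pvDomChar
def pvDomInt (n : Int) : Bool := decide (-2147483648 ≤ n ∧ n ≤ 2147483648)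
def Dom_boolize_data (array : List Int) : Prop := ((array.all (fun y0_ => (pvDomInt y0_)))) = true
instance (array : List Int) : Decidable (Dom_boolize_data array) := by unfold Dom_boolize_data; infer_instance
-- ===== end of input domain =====

-- B replaces A's per-element membership scans of the low/high halves by one threshold
-- comparison per element (objective: faster; quadratic scans removed).

-- ===== PORT A =====
def boolize_data (array : List Int) : List Bool :=
  let unique_data := PySem.List.sorted (PySem.Set.ofList array) (fun x => x) false
  let mid_point := PySem.Int.floordiv (unique_data.length : Int) 2
  let high := PySem.List.slice unique_data (some mid_point) none
  let low := PySem.List.slice unique_data none (some mid_point)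
  array.foldl (fun acc element =>
    if low.contains element then acc ++ [false]
    else if high.contains element then acc ++ [true]
    else acc) []

-- ===== PORT B =====
def boolize_data_alt (array : List Int) : List Bool :=
  if array.isEmpty then []
  else
    let unique_data := PySem.List.sorted (PySem.Set.ofList array) (fun x => x) false
    let threshold := unique_data.getD (unique_data.length / 2) 0
    array.map (fun x => decide (threshold ≤ x))

-- ===== PRECONDITION & SPEC =====
def Spec_boolize_data (array : List Int) (out : List Bool) : Prop := out = boolize_data_alt array
instance (array : List Int) (out : List Bool) : Decidable (Spec_boolize_data array out) := by unfold Spec_boolize_data; infer_instance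

-- ===== CLAIM (what is proved, stated in full; the proofs are below) =====
def Claim_equal_boolize_data : Prop := ∀ (array : List Int), Dom_boolize_data array → Spec_boolize_data array (boolize_data array)

-- ===== LEMMAS AND PROOFS =====

-- In a strictly increasing list, every element of the first m entries is < the m-th entry.
theorem mem_take_lt {u : List Int} (hp : List.Pairwise (· < ·) u) {m : Nat} (hm : m < u.length)
    {e : Int} (he : e ∈ u.take m) : e < u[m] := by
  obtain ⟨j, hj, rfl⟩ := List.mem_iff_getElem.mp he
  have hjm : j < m := lt_of_lt_of_le hj (by simp [List.length_take])
  have := (List.pairwise_iff_getElem.mp hp) j m (by omega) hm hjm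
  simpa using this

-- In a strictly increasing list, every element of the suffix from m is ≥ the m-th entry.
theorem mem_drop_ge {u : List Int} (hp : List.Pairwise (· < ·) u) {m : Nat} (hm : m < u.length)
    {e : Int} (he : e ∈ u.drop m) : u[m] ≤ e := by
  obtain ⟨j, hj, rfl⟩ := List.mem_iff_getElem.mp he
  rw [List.getElem_drop]
  rcases Nat.eq_zero_or_pos j with h0 | h0
  · simp [h0]
  · have hmj : m + j < u.length := by
      have := hj; simp [List.length_drop] at this; omega
    exact le_of_lt ((List.pairwise_iff_getElem.mp hp) m (m + j) hm hmj (by omega))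

-- ===== VERDICT (by name: the statement is the Claim_ definition above) =====
theorem boolize_data_spec : Claim_equal_boolize_data := by
  intro array _
  unfold Spec_boolize_data boolize_data boolize_data_alt
  dsimp only
  by_cases harr : array = []
  · subst harr; simp
  · rw [if_neg (by simp [harr])]
    set u := PySem.List.sorted (PySem.Set.ofList array) (fun x => x) false with hu
    have hune : u ≠ [] := by
      intro h
      rcases List.exists_mem_of_ne_nil array harr with ⟨a, ha⟩
      have : a ∈ u := by
        rw [hu, PySem.List.mem_sorted, PySem.Set.mem_ofList]; exact ha
      simp [h] at this
    have hm : u.length / 2 < u.length :=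
      Nat.div_lt_self (List.length_pos_of_ne_nil hune) one_lt_two
    have hfd : PySem.Int.floordiv (u.length : Int) 2 = ((u.length / 2 : Nat) : Int) := by
      exact_mod_cast PySem.Int.floordiv_natCast u.length 2
    rw [hfd, PySem.List.slice_from_natCast, PySem.List.slice_to_natCast]
    have hpair : List.Pairwise (· < ·) u := PySem.List.sorted_ofList_pairwise_lt array
    have hgetD : u.getD (u.length / 2) 0 = u[u.length / 2] := List.getD_eq_getElem u 0 hm
    rw [hgetD]
    have hbody : ∀ (acc : List Bool), ∀ e ∈ array,
        (if (u.take (u.length / 2)).contains e = true then acc ++ [false]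
         else if (u.drop (u.length / 2)).contains e = true then acc ++ [true]
         else acc) = acc ++ [decide (u[u.length / 2] ≤ e)] := by
      intro acc e he
      have heu : e ∈ u := by
        rw [hu, PySem.List.mem_sorted, PySem.Set.mem_ofList]; exact he
      by_cases hlow : e ∈ u.take (u.length / 2)
      · have hlt : e < u[u.length / 2] := mem_take_lt hpair hm hlow
        simp [hlow, not_le.mpr hlt]
      · have hdrop : e ∈ u.drop (u.length / 2) := by
          rcases List.mem_append.mp (by rw [List.take_append_drop]; exact heu :
            e ∈ u.take (u.length / 2) ++ u.drop (u.length / 2)) with h | h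
          · exact absurd h hlow
          · exact h
        have hle : u[u.length / 2] ≤ e := mem_drop_ge hpair hm hdrop
        simp [hlow, hdrop, hle]
    rw [PySem.List.foldl_congr_mem array _
        (fun acc e => acc ++ [decide (u[u.length / 2] ≤ e)]) [] hbody,
      PySem.List.foldl_append_singleton_eq_map]
    simp
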